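-- pv_equiv track=rewrite | github.com/SSAFY-6-1-3/Algorithm | 1102/p_42840_junh.py | solution
-- ===== SOURCE A (Python) =====
-- def solution(answers):
--     spj = [0, 0, 0]
--
--     for i in range(len(answers)):
--         ans = answers[i]
--
--         if i%5 +1 == ans:
--             spj[0] +=1
--
--         for1 = [1, 3, 4, 5]
--         if i%2 == 0 and ans == 2:
--             spj[1] += 1
--         elif i%2 == 1 and for1[i//2 % 4] == ans:
--             spj[1] += 1
--
--         for2 = [3, 1, 2, 4, 5]
--         if for2[i%10//2] == ans:
--             spj[2] +=1
--
--     rtn = []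
--     max_pnt = max(spj)
--     for i in range(3):
--         if spj[i] == max_pnt:
--             rtn.append(i+1)
--     return rtn
-- ===== SOURCE B (Python) =====
-- def solution(answers):
--     # Histogram/join: one pass builds freq[(i % 40, answer)] counts (40 = lcm of the
--     # three pattern periods); each pattern's score is then read off the table alone.
--     freq = {}
--     for i, a in enumerate(answers):
--         key = (i % 40, a)
--         freq[key] = freq.get(key, 0) + 1
--     patterns = [[1, 2, 3, 4, 5],
--                 [2, 1, 2, 3, 2, 4, 2, 5],
--                 [3, 3, 1, 1, 2, 2, 4, 4, 5, 5]]
--     scores = [sum(freq.get((r, p[r % len(p)]), 0) for r in range(40))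
--               for p in patterns]
--     best = max(scores)
--     return [k + 1 for k in range(3) if scores[k] == best]
-- ===== Notes on version B (the rewrite author's own statement) =====
-- stated objective: alternative
-- what changed: Instead of matching each answer against the patterns element by element, B builds a frequency table keyed by (index mod 40, answer) in one pass (40 = lcm of the pattern periods) and then computes each pattern's score as a 40-term table join, never re-reading the answers.
import Mathlib
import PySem

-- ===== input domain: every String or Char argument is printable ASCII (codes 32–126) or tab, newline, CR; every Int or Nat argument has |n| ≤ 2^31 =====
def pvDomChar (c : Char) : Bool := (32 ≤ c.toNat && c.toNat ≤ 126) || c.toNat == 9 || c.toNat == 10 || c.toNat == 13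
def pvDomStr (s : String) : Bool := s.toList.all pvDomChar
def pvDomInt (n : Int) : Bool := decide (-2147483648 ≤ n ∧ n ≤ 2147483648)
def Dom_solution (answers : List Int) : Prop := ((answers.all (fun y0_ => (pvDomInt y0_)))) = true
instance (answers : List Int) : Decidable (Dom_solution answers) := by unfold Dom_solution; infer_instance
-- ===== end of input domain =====

-- B scores by a different mechanism: one pass builds a frequency table keyed by
-- (index mod 40, answer) and the three scores are then 40-term joins against that
-- table (alternative data structure; same linear cost).

-- ===== PORT A =====
-- the scoring loop (spj) of A
def pvASpj (answers : List Int) : Int × Int × Int :=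
  (PySem.List.pyRange 0 (answers.length : Int) 1).foldl (fun spj i =>
    (if PySem.Int.mod i 5 + 1 == PySem.List.pyGetD answers i 0 then spj.1 + 1 else spj.1,
     if PySem.Int.mod i 2 == 0 && PySem.List.pyGetD answers i 0 == 2 then spj.2.1 + 1
     else if PySem.Int.mod i 2 == 1 &&
             PySem.List.pyGetD [1, 3, 4, 5] (PySem.Int.mod (PySem.Int.floordiv i 2) 4) 0
               == PySem.List.pyGetD answers i 0 then
       spj.2.1 + 1
     else spj.2.1,
     if PySem.List.pyGetD [3, 1, 2, 4, 5] (PySem.Int.floordiv (PySem.Int.mod i 10) 2) 0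
          == PySem.List.pyGetD answers i 0 then
       spj.2.2 + 1
     else spj.2.2)) (0, 0, 0)

-- A's output loop (rtn / max_pnt) over the three scores
def pvAOut (spj : Int × Int × Int) : List Int :=
  (PySem.List.pyRange 0 3 1).foldl (fun rtn i =>
    if PySem.List.pyGetD [spj.1, spj.2.1, spj.2.2] i 0
         == (PySem.List.max? [spj.1, spj.2.1, spj.2.2] (fun x => x)).getD 0 then
      rtn ++ [i + 1]
    else rtn) []

def solution (answers : List Int) : List Int := pvAOut (pvASpj answers)

-- ===== PORT B =====
-- B's single pass: frequency table keyed by (i % 40, answer)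
def pvFreq (answers : List Int) : PySem.Dict (Int × Int) Int :=
  (PySem.List.enumerate answers 0).foldl
    (fun d ia =>
      d.insert (PySem.Int.mod ia.1 40, ia.2)
        (d.getD (PySem.Int.mod ia.1 40, ia.2) 0 + 1)) PySem.Dict.empty

-- one pattern's score read off the table: a 40-term join
def pvTblScore (freq : PySem.Dict (Int × Int) Int) (p : List Int) : Int :=
  ((PySem.List.pyRange 0 40 1).map (fun r =>
    freq.getD (r, PySem.List.pyGetD p (PySem.Int.mod r (p.length : Int)) 0) 0)).sum

-- B's output comprehension over the three scores
def pvBOut (scores : List Int) : List Int :=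
  ((PySem.List.pyRange 0 3 1).filter
      (fun k => PySem.List.pyGetD scores k 0
                  == (PySem.List.max? scores (fun x => x)).getD 0)).map (fun k => k + 1)

def solution_alt (answers : List Int) : List Int :=
  pvBOut ([[1, 2, 3, 4, 5], [2, 1, 2, 3, 2, 4, 2, 5],
           [3, 3, 1, 1, 2, 2, 4, 4, 5, 5]].map (fun p => pvTblScore (pvFreq answers) p))

-- ===== PRECONDITION & SPEC =====
def Spec_solution (answers : List Int) (out : List Int) : Prop := out = solution_alt answers
instance (answers : List Int) (out : List Int) : Decidable (Spec_solution answers out) := by unfold Spec_solution; infer_instance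

-- ===== CLAIM (what is proved, stated in full; the proofs are below) =====
def Claim_equal_solution : Prop := ∀ (answers : List Int), Dom_solution answers → Spec_solution answers (solution answers)

-- ===== LEMMAS AND PROOFS =====

-- both programs' per-pattern score, in one common direct form
def pvDirect (answers p : List Int) (n : Int) : Int :=
  ((PySem.List.pyRange 0 (answers.length : Int) 1).countP
    (fun i => PySem.List.pyGetD answers i 0 == PySem.List.pyGetD p (PySem.Int.mod i n) 0) : Int)

theorem pv_beq_comm (a b : Int) : (a == b) = (b == a) := by
  by_cases h : a = b <;> simp [h]
  exact fun e => h e.symm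

-- summing a point indicator over a duplicate-free residue list
theorem pv_sum_indicator (g : Int → Int) (x1 x2 : Int) :
    ∀ (rs : List Int), rs.Nodup →
      (rs.map (fun r => if x1 = r ∧ x2 = g r then (1 : Int) else 0)).sum
        = if x1 ∈ rs ∧ x2 = g x1 then 1 else 0 := by
  intro rs
  induction rs with
  | nil => intro _; simp
  | cons r t ih =>
    intro hnd
    rcases List.nodup_cons.mp hnd with ⟨hrt, hndt⟩
    simp only [List.map_cons, List.sum_cons, ih hndt, List.mem_cons]
    by_cases h1 : x1 = r <;> by_cases h2 : x2 = g x1 <;> by_cases h3 : x1 ∈ t <;>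
      simp_all

-- the table join over residues covering every key IS the direct count
theorem pv_join (g : Int → Int) (rs : List Int) (hnd : rs.Nodup) :
    ∀ (ks : List (Int × Int)), (∀ x ∈ ks, x.1 ∈ rs) →
      (rs.map (fun r => ((ks.count (r, g r) : Nat) : Int))).sum
        = ((ks.countP (fun x => x.2 == g x.1) : Nat) : Int) := by
  intro ks
  induction ks with
  | nil => intro _; simp
  | cons x t ih =>
    intro hmem
    have hx : x.1 ∈ rs := hmem x (by simp)
    have ht := ih (fun y hy => hmem y (List.mem_cons_of_mem _ hy))
    have hsplit :
        (rs.map (fun r => (((x :: t).count (r, g r) : Nat) : Int))).sum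
          = (rs.map (fun r => ((t.count (r, g r) : Nat) : Int))).sum
            + (rs.map (fun r => if x.1 = r ∧ x.2 = g r then (1 : Int) else 0)).sum := by
      rw [← List.sum_map_add]
      refine congrArg List.sum (List.map_congr_left ?_)
      intro r _
      rw [List.count_cons]
      by_cases h : x.1 = r ∧ x.2 = g r
      · have hb : x = (r, g r) := by obtain ⟨a, b⟩ := x; simp_all
        push_cast
        simp [hb]
      · have hb : x ≠ (r, g r) := fun e => h (by subst e; exact ⟨rfl, rfl⟩)
        push_cast
        simp only [hb, if_false, beq_iff_eq]
        by_cases e1 : x.1 = r <;> by_cases e2 : x.2 = g r <;>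
          simp [e1, e2, fun a b => h ⟨a, b⟩]
    rw [hsplit, ht, pv_sum_indicator g x.1 x.2 rs hnd]
    rw [List.countP_cons]
    by_cases hc : x.2 = g x.1
    · simp [hx, hc]
    · have : ¬(x.2 == g x.1) = true := by simpa using hc
      simp [hc, this]

-- A's three tests rewritten as lookups in the cyclic tables
theorem pv_q1 (i ans : Int) :
    (PySem.Int.mod i 5 + 1 == ans)
      = (ans == PySem.List.pyGetD [1, 2, 3, 4, 5] (PySem.Int.mod i 5) 0) := by
  have h0 : 0 ≤ PySem.Int.mod i 5 := PySem.Int.mod_nonneg i (by norm_num)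
  have h5 : PySem.Int.mod i 5 < 5 := PySem.Int.mod_lt i (by norm_num)
  set r := PySem.Int.mod i 5 with hr
  interval_cases r <;> simp [pv_beq_comm, PySem.List.pyGetD]

theorem pv_q2 (i ans : Int) :
    (if PySem.Int.mod i 2 == 0 && ans == 2 then true
     else if PySem.Int.mod i 2 == 1 &&
             PySem.List.pyGetD [1, 3, 4, 5] (PySem.Int.mod (PySem.Int.floordiv i 2) 4) 0 == ans then true
     else false)
      = (ans == PySem.List.pyGetD [2, 1, 2, 3, 2, 4, 2, 5] (PySem.Int.mod i 8) 0) := by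
  rw [PySem.Int.mod_eq_emod_of_pos (a := i) (b := 2) (by norm_num),
      PySem.Int.mod_eq_emod_of_pos (a := i) (b := 8) (by norm_num),
      PySem.Int.floordiv_eq_ediv_of_pos (a := i) (b := 2) (by norm_num),
      PySem.Int.mod_eq_emod_of_pos (a := i / 2) (b := 4) (by norm_num)]
  have h0 : 0 ≤ i % 8 := Int.emod_nonneg i (by norm_num)
  have h8 : i % 8 < 8 := Int.emod_lt_of_pos i (by norm_num)
  have e2 : i % 2 = (i % 8) % 2 := by omega
  have e4 : (i / 2) % 4 = (i % 8) / 2 := by omega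
  rw [e2, e4]
  set r := i % 8 with hr
  interval_cases r <;> simp [pv_beq_comm, PySem.List.pyGetD] <;> rfl

theorem pv_q3 (i ans : Int) :
    (PySem.List.pyGetD [3, 1, 2, 4, 5] (PySem.Int.floordiv (PySem.Int.mod i 10) 2) 0 == ans)
      = (ans == PySem.List.pyGetD [3, 3, 1, 1, 2, 2, 4, 4, 5, 5] (PySem.Int.mod i 10) 0) := by
  have h0 : 0 ≤ PySem.Int.mod i 10 := PySem.Int.mod_nonneg i (by norm_num)
  have h10 : PySem.Int.mod i 10 < 10 := PySem.Int.mod_lt i (by norm_num)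
  set r := PySem.Int.mod i 10 with hr
  interval_cases r <;> simp [pv_beq_comm, PySem.List.pyGetD, PySem.Int.floordiv]

-- A's combined loop computes the three direct counts
theorem pv_a_counts (answers : List Int) :
    pvASpj answers
      = (pvDirect answers [1, 2, 3, 4, 5] 5,
         pvDirect answers [2, 1, 2, 3, 2, 4, 2, 5] 8,
         pvDirect answers [3, 3, 1, 1, 2, 2, 4, 4, 5, 5] 10) := by
  unfold pvASpj pvDirect
  rw [PySem.List.foldl_prod_mk
      (f := fun (s : Int) (i : Int) =>
        if PySem.Int.mod i 5 + 1 == PySem.List.pyGetD answers i 0 then s + 1 else s)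
      (g := fun (s : Int × Int) (i : Int) =>
        (if PySem.Int.mod i 2 == 0 && PySem.List.pyGetD answers i 0 == 2 then s.1 + 1
         else if PySem.Int.mod i 2 == 1 &&
                 PySem.List.pyGetD [1, 3, 4, 5] (PySem.Int.mod (PySem.Int.floordiv i 2) 4) 0
                   == PySem.List.pyGetD answers i 0 then s.1 + 1
         else s.1,
         if PySem.List.pyGetD [3, 1, 2, 4, 5] (PySem.Int.floordiv (PySem.Int.mod i 10) 2) 0
              == PySem.List.pyGetD answers i 0 then s.2 + 1
         else s.2))]
  rw [PySem.List.foldl_prod_mk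
      (f := fun (s : Int) (i : Int) =>
        if PySem.Int.mod i 2 == 0 && PySem.List.pyGetD answers i 0 == 2 then s + 1
        else if PySem.Int.mod i 2 == 1 &&
                PySem.List.pyGetD [1, 3, 4, 5] (PySem.Int.mod (PySem.Int.floordiv i 2) 4) 0
                  == PySem.List.pyGetD answers i 0 then s + 1
        else s)
      (g := fun (s : Int) (i : Int) =>
        if PySem.List.pyGetD [3, 1, 2, 4, 5] (PySem.Int.floordiv (PySem.Int.mod i 10) 2) 0
             == PySem.List.pyGetD answers i 0 then s + 1
        else s)]
  refine congrArg₂ Prod.mk ?_ (congrArg₂ Prod.mk ?_ ?_)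
  · have hs : (fun (s : Int) (i : Int) =>
        if PySem.Int.mod i 5 + 1 == PySem.List.pyGetD answers i 0 then s + 1 else s)
      = (fun (s : Int) (i : Int) =>
        if PySem.List.pyGetD answers i 0
             == PySem.List.pyGetD [1, 2, 3, 4, 5] (PySem.Int.mod i 5) 0 then s + 1 else s) := by
      funext s i
      rw [pv_q1 i (PySem.List.pyGetD answers i 0)]
    rw [hs, PySem.List.foldl_if_add_one]
    simp
  · have hs : (fun (s : Int) (i : Int) =>
        if PySem.Int.mod i 2 == 0 && PySem.List.pyGetD answers i 0 == 2 then s + 1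
        else if PySem.Int.mod i 2 == 1 &&
                PySem.List.pyGetD [1, 3, 4, 5] (PySem.Int.mod (PySem.Int.floordiv i 2) 4) 0
                  == PySem.List.pyGetD answers i 0 then s + 1
        else s)
      = (fun (s : Int) (i : Int) =>
        if PySem.List.pyGetD answers i 0
             == PySem.List.pyGetD [2, 1, 2, 3, 2, 4, 2, 5] (PySem.Int.mod i 8) 0 then s + 1 else s) := by
      funext s i
      rw [← pv_q2 i (PySem.List.pyGetD answers i 0)]
      cases h1 : (PySem.Int.mod i 2 == 0 && PySem.List.pyGetD answers i 0 == 2) <;>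
        cases h2 : (PySem.Int.mod i 2 == 1 &&
          PySem.List.pyGetD [1, 3, 4, 5] (PySem.Int.mod (PySem.Int.floordiv i 2) 4) 0
            == PySem.List.pyGetD answers i 0) <;> simp
    rw [hs, PySem.List.foldl_if_add_one]
    simp
  · have hs : (fun (s : Int) (i : Int) =>
        if PySem.List.pyGetD [3, 1, 2, 4, 5] (PySem.Int.floordiv (PySem.Int.mod i 10) 2) 0
             == PySem.List.pyGetD answers i 0 then s + 1
        else s)
      = (fun (s : Int) (i : Int) =>
        if PySem.List.pyGetD answers i 0
             == PySem.List.pyGetD [3, 3, 1, 1, 2, 2, 4, 4, 5, 5] (PySem.Int.mod i 10) 0 then s + 1 else s) := by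
      funext s i
      rw [pv_q3 i (PySem.List.pyGetD answers i 0)]
    rw [hs, PySem.List.foldl_if_add_one]
    simp

-- B's table join for one pattern computes the same direct count
theorem pv_b_score (answers p : List Int) (n : Int) (hn : (p.length : Int) = n)
    (hpos : 0 < n) (hdvd : n ∣ 40) :
    pvTblScore (pvFreq answers) p = pvDirect answers p n := by
  unfold pvTblScore pvFreq pvDirect
  rw [hn]
  have hf :
      ((PySem.List.enumerate answers 0).foldl
          (fun d ia =>
            d.insert (PySem.Int.mod ia.1 40, ia.2)
              (d.getD (PySem.Int.mod ia.1 40, ia.2) 0 + 1)) PySem.Dict.empty)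
        = (((PySem.List.enumerate answers 0).map (fun ia => (PySem.Int.mod ia.1 40, ia.2))).foldl
            (fun d x => d.insert x (d.getD x 0 + 1))
            (PySem.Dict.empty : PySem.Dict (Int × Int) Int)) := by
    rw [List.foldl_map]
  rw [hf]
  have hget : ∀ r : Int,
      ((((PySem.List.enumerate answers 0).map (fun ia => (PySem.Int.mod ia.1 40, ia.2))).foldl
          (fun d x => d.insert x (d.getD x 0 + 1))
          (PySem.Dict.empty : PySem.Dict (Int × Int) Int)).getD
        (r, PySem.List.pyGetD p (PySem.Int.mod r n) 0) 0)
      = ((((PySem.List.enumerate answers 0).map (fun ia => (PySem.Int.mod ia.1 40, ia.2))).count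
            (r, PySem.List.pyGetD p (PySem.Int.mod r n) 0) : Nat) : Int) := by
    intro r
    rw [PySem.Dict.getD_foldl_insert_add_one]
    simp
  rw [List.map_congr_left (fun r _ => hget r)]
  have hnd : (PySem.List.pyRange 0 40 1).Nodup := by decide
  have hmem : ∀ x ∈ (PySem.List.enumerate answers 0).map (fun ia => (PySem.Int.mod ia.1 40, ia.2)),
      x.1 ∈ PySem.List.pyRange 0 40 1 := by
    intro x hx
    rcases List.mem_map.mp hx with ⟨ia, _, rfl⟩
    rw [PySem.List.mem_pyRange_one]
    exact ⟨PySem.Int.mod_nonneg ia.1 (by norm_num), PySem.Int.mod_lt ia.1 (by norm_num)⟩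
  rw [pv_join (fun r => PySem.List.pyGetD p (PySem.Int.mod r n) 0)
      (PySem.List.pyRange 0 40 1) hnd _ hmem]
  rw [List.countP_map]
  rw [PySem.List.enumerate_eq_map_pyRange answers 0]
  rw [List.countP_map]
  have hlen : PySem.List.len answers = (answers.length : Int) := rfl
  rw [hlen]
  congr 1
  refine List.countP_congr ?_
  intro i _
  simp only [Function.comp]
  have hm : PySem.Int.mod (PySem.Int.mod i 40) n = PySem.Int.mod i n := by
    rw [PySem.Int.mod_eq_emod_of_pos (a := i) (b := 40) (by norm_num),
        PySem.Int.mod_eq_emod_of_pos (b := n) hpos,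
        PySem.Int.mod_eq_emod_of_pos (a := i) (b := n) hpos]
    exact Int.emod_emod_of_dvd i hdvd
  rw [hm]

-- the two output-building tails agree on any triple of scores
theorem pv_tail (a b c : Int) : pvAOut (a, b, c) = pvBOut [a, b, c] := by
  unfold pvAOut pvBOut
  have hr : PySem.List.pyRange 0 3 1 = [0, 1, 2] := by decide
  rw [hr]
  simp only [List.foldl_cons, List.foldl_nil, List.filter]
  cases ha : (PySem.List.pyGetD [a, b, c] 0 0
      == (PySem.List.max? [a, b, c] (fun x => x)).getD 0) <;>
    cases hb : (PySem.List.pyGetD [a, b, c] 1 0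
        == (PySem.List.max? [a, b, c] (fun x => x)).getD 0) <;>
      cases hc : (PySem.List.pyGetD [a, b, c] 2 0
          == (PySem.List.max? [a, b, c] (fun x => x)).getD 0) <;>
        simp

theorem pv_main (answers : List Int) : solution answers = solution_alt answers := by
  unfold solution solution_alt
  rw [pv_a_counts, List.map_cons, List.map_cons, List.map_cons, List.map_nil]
  rw [pv_b_score answers [1, 2, 3, 4, 5] 5 (by norm_num) (by norm_num) (by norm_num),
      pv_b_score answers [2, 1, 2, 3, 2, 4, 2, 5] 8 (by norm_num) (by norm_num) (by norm_num),
      pv_b_score answers [3, 3, 1, 1, 2, 2, 4, 4, 5, 5] 10 (by norm_num) (by norm_num) (by norm_num)]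
  exact pv_tail _ _ _

-- ===== VERDICT (by name: the statement is the Claim_ definition above) =====
theorem solution_spec : Claim_equal_solution := by
  intro answers _
  unfold Spec_solution
  exact pv_main answers
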